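-- pv_equiv track=rewrite | github.com/rcout328/agent-master | api/app.py | extract_insights
-- ===== SOURCE A (Python) =====
-- def extract_insights(text):
--     """Extract industry insights from analysis"""
--     insights = []
--     in_insights = False
--     for line in text.split('\n'):
--         if 'insights' in line.lower():
--             in_insights = True
--             continue
--         if in_insights and line.strip().startswith('-'):
--             insights.append(line.strip('- ').strip())
--         if in_insights and not line.strip():
--             in_insights = False
--     return insights
-- ===== SOURCE B (Python) =====
-- def extract_insights(text):
--     """Extract industry insights from analysis"""
--     # Grouping pass: split lines into paragraph blocks at whitespace-only lines.
--     blocks = []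
--     cur = []
--     for line in text.split('\n'):
--         if line.strip():
--             cur.append(line)
--         else:
--             blocks.append(cur)
--             cur = []
--     blocks.append(cur)
--     # Each block is independent: collect bullets after an 'insights' header line.
--     results = []
--     for block in blocks:
--         seen = False
--         for line in block:
--             if 'insights' in line.lower():
--                 seen = True
--             elif seen and line.lstrip().startswith('-'):
--                 results.append(line.strip('- ').strip())
--     return results
-- ===== Notes on version B (the rewrite author's own statement) =====
-- stated objective: alternative
-- what changed: Replaces A's single stateful loop (header flag reset at blank lines) by two independent passes: group the lines into paragraph blocks delimited by whitespace-only lines, then scan each block on its own for an 'insights' header followed by bullet lines.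
import Mathlib
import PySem

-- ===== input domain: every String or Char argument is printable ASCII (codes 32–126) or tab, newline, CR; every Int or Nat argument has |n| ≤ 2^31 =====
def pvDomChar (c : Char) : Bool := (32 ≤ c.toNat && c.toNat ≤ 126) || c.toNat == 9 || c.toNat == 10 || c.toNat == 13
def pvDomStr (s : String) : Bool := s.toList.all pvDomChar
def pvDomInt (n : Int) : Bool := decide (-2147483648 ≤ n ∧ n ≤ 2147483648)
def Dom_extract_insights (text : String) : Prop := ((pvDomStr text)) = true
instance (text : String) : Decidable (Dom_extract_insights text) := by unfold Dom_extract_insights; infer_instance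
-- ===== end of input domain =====

-- B rewrites A as two independent passes (group lines into paragraph blocks, then scan each block);
-- objective: alternative decomposition, same cost; equivalence of the RETURN value is proved below.

-- ===== PORT A =====
-- A's single stateful loop over the lines: header flag set by 'insights' lines, reset at blank lines.
def extract_insights_step (st : List String × Bool) (line : List Char) : List String × Bool :=
  if PySem.Chars.isIn "insights".toList (PySem.Chars.lower line) then (st.1, true)
  else
    let st1 := if st.2 && PySem.Chars.startswith (PySem.Chars.strip line) "-".toList
      then (st.1 ++ [String.ofList (PySem.Chars.strip (PySem.Chars.stripChars line "- ".toList))], st.2)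
      else st
    if st1.2 && (PySem.Chars.strip line == []) then (st1.1, false) else st1

def extract_insights (text : String) : List String :=
  ((PySem.Chars.splitOn text.toList "\n".toList).foldl extract_insights_step ([], false)).1

-- ===== PORT B =====
-- grouping pass: blocks of non-blank lines, split at whitespace-only lines
def pvAlt_group (p : List (List (List Char)) × List (List Char)) (line : List Char) :
    List (List (List Char)) × List (List Char) :=
  if PySem.Chars.strip line ≠ [] then (p.1, p.2 ++ [line]) else (p.1 ++ [p.2], [])

-- per-block scan: 'insights' header sets `seen`, then bullets are collected
def pvAlt_scanStep (q : List String × Bool) (line : List Char) : List String × Bool :=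
  if PySem.Chars.isIn "insights".toList (PySem.Chars.lower line) then (q.1, true)
  else if q.2 && PySem.Chars.startswith (PySem.Chars.lstrip line) "-".toList then
    (q.1 ++ [String.ofList (PySem.Chars.strip (PySem.Chars.stripChars line "- ".toList))], q.2)
  else q

def pvAlt_procBlock (res : List String) (block : List (List Char)) : List String :=
  (block.foldl pvAlt_scanStep (res, false)).1

def extract_insights_alt (text : String) : List String :=
  let p := (PySem.Chars.splitOn text.toList "\n".toList).foldl pvAlt_group ([], [])
  (p.1 ++ [p.2]).foldl pvAlt_procBlock []

-- ===== PRECONDITION & SPEC =====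
def Spec_extract_insights (text : String) (out : List String) : Prop := out = extract_insights_alt text
instance (text : String) (out : List String) : Decidable (Spec_extract_insights text out) := by unfold Spec_extract_insights; infer_instance

-- ===== CLAIM (what is proved, stated in full; the proofs are below) =====
def Claim_equal_extract_insights : Prop := ∀ (text : String), Dom_extract_insights text → Spec_extract_insights text (extract_insights text)

-- ===== LEMMAS AND PROOFS =====

-- the common per-line specification both ports compute
def pvSpec : List (List Char) → Bool → List String
  | [], _ => []
  | l :: t, f =>
    if PySem.Chars.isIn "insights".toList (PySem.Chars.lower l) then pvSpec t true
    else (if f && PySem.Chars.startswith (PySem.Chars.strip l) "-".toList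
            then [String.ofList (PySem.Chars.strip (PySem.Chars.stripChars l "- ".toList))] else [])
         ++ pvSpec t (f && !(PySem.Chars.strip l == []))

lemma pv_strip_nil_isspace (l : List Char) (h : PySem.Chars.strip l = []) :
    ∀ c ∈ l, PySem.Chars.isspace c = true := by
  intro c hc
  have h' : List.dropWhile PySem.Chars.isspace (PySem.Chars.lstrip l).reverse = [] := by
    have h2 := h
    simp only [PySem.Chars.strip, PySem.Chars.rstrip, List.reverse_eq_nil_iff] at h2
    exact h2
  have h1 : ∀ x ∈ PySem.Chars.lstrip l, PySem.Chars.isspace x = true := by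
    intro x hx
    exact List.dropWhile_eq_nil_iff.mp h' x (by simpa using hx)
  rw [← List.takeWhile_append_dropWhile (p := PySem.Chars.isspace) (l := l)] at hc
  rcases List.mem_append.mp hc with h2 | h2
  · exact List.mem_takeWhile_imp h2
  · exact h1 _ h2

lemma pv_ins_of_blank (l : List Char) (h : PySem.Chars.strip l = []) :
    PySem.Chars.isIn "insights".toList (PySem.Chars.lower l) = false := by
  by_contra hin
  have hin' : PySem.Chars.isIn "insights".toList (PySem.Chars.lower l) = true := by
    simpa using hin
  have hsub := (PySem.Chars.isIn_iff_infix _ _).mp hin'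
  have hi : 'i' ∈ PySem.Chars.lower l := hsub.subset (by decide)
  simp only [PySem.Chars.lower, List.mem_map] at hi
  obtain ⟨c, hcl, hlow⟩ := hi
  have hs : PySem.Chars.isspace c = true := pv_strip_nil_isspace l h c hcl
  by_cases hu : PySem.Chars.isupper c = true
  · simp only [PySem.Chars.isupper, Bool.and_eq_true, decide_eq_true_eq, Char.le_def,
      UInt32.le_iff_toNat_le] at hu
    simp only [PySem.Chars.isspace, Char.toNat] at hs
    simp only [Bool.or_eq_true, Bool.and_eq_true, decide_eq_true_eq] at hs
    have hA : 'A'.val.toNat = 65 := rfl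
    have hZ : 'Z'.val.toNat = 90 := rfl
    omega
  · simp only [PySem.Chars.lowerChar, hu, if_false, Bool.false_eq_true] at hlow
    subst hlow
    simp [PySem.Chars.isspace] at hs

lemma pv_startswith_head (x : List Char) (d : Char) :
    PySem.Chars.startswith x [d] = (x.head? == some d) := by
  cases x with
  | nil => simp [PySem.Chars.startswith, List.isPrefixOf]
  | cons c t => simp [PySem.Chars.startswith, List.isPrefixOf, BEq.comm]

lemma pv_strip_head? (l : List Char) :
    (PySem.Chars.strip l).head? = (PySem.Chars.lstrip l).head? := by
  cases hm : PySem.Chars.lstrip l with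
  | nil => simp [PySem.Chars.strip, PySem.Chars.rstrip, hm]
  | cons c t =>
    have hc : PySem.Chars.isspace c = false := by
      have hd := List.head?_dropWhile_not PySem.Chars.isspace l
      rw [show List.dropWhile PySem.Chars.isspace l = c :: t from hm] at hd
      simpa using hd
    show (PySem.Chars.rstrip (PySem.Chars.lstrip l)).head? = _
    rw [hm]
    simp only [PySem.Chars.rstrip, List.reverse_cons, List.dropWhile_append]
    split_ifs with hE
    · simp [hc]
    · simp

lemma pv_bul_eq (l : List Char) :
    PySem.Chars.startswith (PySem.Chars.strip l) "-".toList
      = PySem.Chars.startswith (PySem.Chars.lstrip l) "-".toList := by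
  have hd : ("-".toList) = ['-'] := rfl
  rw [hd, pv_startswith_head, pv_startswith_head, pv_strip_head?]

lemma pv_A_fold (ls : List (List Char)) : ∀ acc f,
    (ls.foldl extract_insights_step (acc, f)).1 = acc ++ pvSpec ls f := by
  induction ls with
  | nil => intro acc f; simp [pvSpec]
  | cons l t ih =>
    intro acc f
    simp only [List.foldl_cons, pvSpec, extract_insights_step]
    split_ifs with h1 h2 h3 h4
    · rw [ih]
    · exfalso
      have hb : PySem.Chars.strip l = [] := by
        have := ((Bool.and_eq_true _ _).mp h3).2; simpa using this
      rw [hb] at h2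
      simp [PySem.Chars.startswith] at h2
    · have hf : f = true := ((Bool.and_eq_true _ _).mp h2).1
      have hb : (PySem.Chars.strip l == []) = false := by
        rw [hf] at h3; simpa using h3
      rw [ih, hf, hb]; simp
    · have hb : (PySem.Chars.strip l == []) = true := ((Bool.and_eq_true _ _).mp h4).2
      rw [ih, hb]; simp
    · have hfb : (f && !(PySem.Chars.strip l == [])) = f := by
        cases hF : f <;> cases hB : (PySem.Chars.strip l == []) <;> simp_all
      rw [ih, hfb]; simp

lemma pv_scan_acc (b : List (List Char)) : ∀ res f,
    b.foldl pvAlt_scanStep (res, f)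
      = (res ++ (b.foldl pvAlt_scanStep ([], f)).1, (b.foldl pvAlt_scanStep ([], f)).2) := by
  induction b with
  | nil => intro res f; simp
  | cons l b ih =>
    intro res f
    have h : pvAlt_scanStep (res, f) l
        = (res ++ (pvAlt_scanStep ([], f) l).1, (pvAlt_scanStep ([], f) l).2) := by
      simp only [pvAlt_scanStep]; split_ifs <;> simp
    simp only [List.foldl_cons]
    rw [h, ih, ih (pvAlt_scanStep ([], f) l).1]
    simp

lemma pv_group_acc (ls : List (List Char)) : ∀ bs cur,
    ls.foldl pvAlt_group (bs, cur)
      = (bs ++ (ls.foldl pvAlt_group ([], cur)).1, (ls.foldl pvAlt_group ([], cur)).2) := by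
  induction ls with
  | nil => intro bs cur; simp
  | cons l ls ih =>
    intro bs cur
    have h : pvAlt_group (bs, cur) l
        = (bs ++ (pvAlt_group ([], cur) l).1, (pvAlt_group ([], cur) l).2) := by
      simp only [pvAlt_group]; split_ifs <;> simp
    simp only [List.foldl_cons]
    rw [h, ih, ih (pvAlt_group ([], cur) l).1]
    simp

lemma pv_proc_acc (blocks : List (List (List Char))) : ∀ res,
    blocks.foldl pvAlt_procBlock res = res ++ blocks.foldl pvAlt_procBlock [] := by
  induction blocks with
  | nil => intro res; simp
  | cons b blocks ih =>
    intro res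
    have h : pvAlt_procBlock res b = res ++ pvAlt_procBlock [] b := by
      simp only [pvAlt_procBlock]; rw [pv_scan_acc b res false]
    simp only [List.foldl_cons]
    rw [h, ih, ih (pvAlt_procBlock [] b)]
    simp

lemma pv_B_main (ls : List (List Char)) : ∀ cur,
    ((ls.foldl pvAlt_group ([], cur)).1 ++ [(ls.foldl pvAlt_group ([], cur)).2]).foldl pvAlt_procBlock []
      = (cur.foldl pvAlt_scanStep ([], false)).1 ++ pvSpec ls ((cur.foldl pvAlt_scanStep ([], false)).2) := by
  induction ls with
  | nil => intro cur; simp [pvSpec, pvAlt_procBlock]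
  | cons l t ih =>
    intro cur
    by_cases hb : PySem.Chars.strip l = []
    · have hg : pvAlt_group ([], cur) l = ([cur], []) := by
        simp [pvAlt_group, hb]
      have hins := pv_ins_of_blank l hb
      have ih0 := ih []
      simp only [List.foldl_nil] at ih0
      simp only [List.foldl_cons, hg]
      rw [pv_group_acc t [cur] []]
      simp only [List.cons_append, List.nil_append] at *
      rw [List.foldl_cons, pv_proc_acc, ih0]
      simp only [pvSpec, hins, Bool.false_eq_true, if_false, hb, pvAlt_procBlock]
      simp [PySem.Chars.startswith]
    · have hg : pvAlt_group ([], cur) l = ([], cur ++ [l]) := by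
        simp [pvAlt_group, hb]
      simp only [List.foldl_cons, hg]
      rw [ih (cur ++ [l])]
      rw [List.foldl_append]
      simp only [List.foldl_cons, List.foldl_nil]
      have hbeq : (PySem.Chars.strip l == []) = false := by simpa using hb
      simp only [pvSpec, pvAlt_scanStep, pv_bul_eq l, hbeq]
      split_ifs <;> simp

-- ===== VERDICT (by name: the statement is the Claim_ definition above) =====
theorem extract_insights_spec : Claim_equal_extract_insights := by
  intro text _
  unfold Spec_extract_insights extract_insights extract_insights_alt
  rw [pv_A_fold, pv_B_main]
  simp
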